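-- pv_equiv track=rewrite | github.com/qrqodes/UNI-LINGUS-GROKKED | uni_language.py | convert_to_whisper_mode
-- ===== SOURCE A (Python) =====
-- def convert_to_whisper_mode(text):
--     """Convert UNI text to whisper mode (voiceless consonants)."""
--     # Replace voiced consonants with voiceless ones
--     whisper_map = {
--         'B': 'P', 'D': 'T', 'G': 'K', 'J': 'X', 'V': 'F', 'Z': 'S'
--     }
--
--     result = text.upper()
--     for voiced, voiceless in whisper_map.items():
--         result = result.replace(voiced, voiceless)
--
--     return result
-- ===== SOURCE B (Python) =====
-- def convert_to_whisper_mode(text):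
--     """Convert UNI text to whisper mode (voiceless consonants)."""
--     whisper_map = {
--         'B': 'P', 'D': 'T', 'G': 'K', 'J': 'X', 'V': 'F', 'Z': 'S'
--     }
--     return ''.join(whisper_map.get(c, c) for c in text.upper())
-- ===== Notes on version B (the rewrite author's own statement) =====
-- stated objective: idiomatic
-- what changed: Replaced six sequential whole-string str.replace passes with one single pass over the uppercased characters, mapping each character through the dict with itself as default and joining the result.
import Mathlib
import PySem

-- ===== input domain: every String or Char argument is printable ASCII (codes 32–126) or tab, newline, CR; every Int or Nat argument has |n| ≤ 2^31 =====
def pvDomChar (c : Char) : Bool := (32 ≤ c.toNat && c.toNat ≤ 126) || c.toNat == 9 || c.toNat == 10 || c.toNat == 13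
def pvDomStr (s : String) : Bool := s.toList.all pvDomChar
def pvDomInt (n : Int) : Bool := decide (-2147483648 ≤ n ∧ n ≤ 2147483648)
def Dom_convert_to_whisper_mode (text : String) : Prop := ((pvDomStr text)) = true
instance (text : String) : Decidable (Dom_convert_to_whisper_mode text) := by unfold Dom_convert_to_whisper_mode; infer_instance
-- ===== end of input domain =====

-- B replaces A's six sequential whole-string .replace passes by a single per-character
-- pass through the dict (idiomatic single scan); equal return values on all of Dom.

-- ===== PORT A =====
-- whisper_map as a PySem.Dict (insertion order)
def pvWhisperMap : PySem.Dict String String :=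
  (((((PySem.Dict.empty.insert "B" "P").insert "D" "T").insert "G" "K").insert
      "J" "X").insert "V" "F").insert "Z" "S"

def convert_to_whisper_mode (text : String) : String :=
  pvWhisperMap.items.foldl
    (fun result p => PySem.Str.replace result p.1 p.2)
    (PySem.Str.upper text)

-- ===== PORT B =====
def convert_to_whisper_mode_alt (text : String) : String :=
  PySem.Str.join ""
    ((PySem.Str.upper text).toList.map
      (fun c => pvWhisperMap.getD (String.ofList [c]) (String.ofList [c])))

-- ===== PRECONDITION & SPEC =====
def Spec_convert_to_whisper_mode (text : String) (out : String) : Prop := out = convert_to_whisper_mode_alt text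
instance (text : String) (out : String) : Decidable (Spec_convert_to_whisper_mode text out) := by unfold Spec_convert_to_whisper_mode; infer_instance

-- ===== CLAIM (what is proved, stated in full; the proofs are below) =====
def Claim_equal_convert_to_whisper_mode : Prop := ∀ (text : String), Dom_convert_to_whisper_mode text → Spec_convert_to_whisper_mode text (convert_to_whisper_mode text)

-- ===== LEMMAS AND PROOFS =====

-- single-character replace IS a per-character map
theorem pv_go_single (a b : Char) : ∀ (l : List Char) (fuel : Nat) (acc : List Char),
    l.length ≤ fuel →
    PySem.Chars.replace.go [a] [b] fuel l acc
      = acc.reverse ++ l.map (fun c => if c = a then b else c) := by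
  intro l
  induction l with
  | nil =>
    intro fuel acc _
    cases fuel <;> simp [PySem.Chars.replace.go]
  | cons c t ih =>
    intro fuel acc h
    cases fuel with
    | zero => simp at h
    | succ n =>
      by_cases hca : c = a
      · subst hca
        have : PySem.Chars.replace.go [c] [b] (n+1) (c :: t) acc
            = PySem.Chars.replace.go [c] [b] n t (b :: acc) := by
          simp [PySem.Chars.replace.go, List.isPrefixOf]
        rw [this, ih n (b :: acc) (by simpa using h)]
        simp
      · have : PySem.Chars.replace.go [a] [b] (n+1) (c :: t) acc
            = PySem.Chars.replace.go [a] [b] n t (c :: acc) := by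
          simp [PySem.Chars.replace.go, List.isPrefixOf, Ne.symm hca]
        rw [this, ih n (c :: acc) (by simpa using h)]
        simp [hca]

theorem pv_replace_single (a b : Char) (l : List Char) :
    PySem.Chars.replace l [a] [b] = l.map (fun c => if c = a then b else c) := by
  simp [PySem.Chars.replace, pv_go_single a b l l.length [] (le_refl _)]

-- the per-character substitution both sides compute
def pvF (c : Char) : Char :=
  if c = 'B' then 'P' else if c = 'D' then 'T' else if c = 'G' then 'K'
  else if c = 'J' then 'X' else if c = 'V' then 'F' else if c = 'Z' then 'S' else c

theorem pv_key (c a : Char) : (String.ofList [c] = String.ofList [a]) ↔ c = a := by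
  constructor
  · intro h
    have := congrArg String.toList h
    simpa using this
  · intro h; rw [h]

theorem pv_getD_char (c : Char) :
    pvWhisperMap.getD (String.ofList [c]) (String.ofList [c]) = String.ofList [pvF c] := by
  have hB : ("B" : String) = String.ofList ['B'] := rfl
  have hD : ("D" : String) = String.ofList ['D'] := rfl
  have hG : ("G" : String) = String.ofList ['G'] := rfl
  have hJ : ("J" : String) = String.ofList ['J'] := rfl
  have hV : ("V" : String) = String.ofList ['V'] := rfl
  have hZ : ("Z" : String) = String.ofList ['Z'] := rfl
  simp only [pvWhisperMap, PySem.Dict.getD_insert, hB, hD, hG, hJ, hV, hZ, pv_key, pvF]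
  split_ifs <;> simp_all [PySem.Dict.getD, PySem.Dict.get?, PySem.Dict.empty]

theorem pv_items : pvWhisperMap.items =
    [("B","P"),("D","T"),("G","K"),("J","X"),("V","F"),("Z","S")] := by decide

theorem pv_chain (c : Char) :
    (fun x => if x = 'Z' then 'S' else x)
      ((fun x => if x = 'V' then 'F' else x)
        ((fun x => if x = 'J' then 'X' else x)
          ((fun x => if x = 'G' then 'K' else x)
            ((fun x => if x = 'D' then 'T' else x)
              ((fun x => if x = 'B' then 'P' else x) c))))) = pvF c := by
  by_cases h1 : c = 'B'
  · subst h1; decide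
  by_cases h2 : c = 'D'
  · subst h2; decide
  by_cases h3 : c = 'G'
  · subst h3; decide
  by_cases h4 : c = 'J'
  · subst h4; decide
  by_cases h5 : c = 'V'
  · subst h5; decide
  by_cases h6 : c = 'Z'
  · subst h6; decide
  simp [pvF, h1, h2, h3, h4, h5, h6]

-- ===== VERDICT (by name: the statement is the Claim_ definition above) =====
theorem convert_to_whisper_mode_spec : Claim_equal_convert_to_whisper_mode := by
  intro text _
  unfold Spec_convert_to_whisper_mode convert_to_whisper_mode convert_to_whisper_mode_alt
  apply String.toList_injective
  rw [pv_items]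
  have e1 : ("B" : String).toList = ['B'] := rfl
  have e2 : ("D" : String).toList = ['D'] := rfl
  have e3 : ("G" : String).toList = ['G'] := rfl
  have e4 : ("J" : String).toList = ['J'] := rfl
  have e5 : ("V" : String).toList = ['V'] := rfl
  have e6 : ("Z" : String).toList = ['Z'] := rfl
  have e7 : ("P" : String).toList = ['P'] := rfl
  have e8 : ("T" : String).toList = ['T'] := rfl
  have e9 : ("K" : String).toList = ['K'] := rfl
  have e10 : ("X" : String).toList = ['X'] := rfl
  have e11 : ("F" : String).toList = ['F'] := rfl
  have e12 : ("S" : String).toList = ['S'] := rfl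
  have e0 : ("" : String).toList = [] := rfl
  simp only [List.foldl_cons, List.foldl_nil, PySem.Str.toList_replace, PySem.Str.toList_join,
    e0, e1, e2, e3, e4, e5, e6, e7, e8, e9, e10, e11, e12,
    pv_replace_single, List.map_map, pv_getD_char]
  have hR : (String.toList ∘ fun c => String.ofList [pvF c]) = fun c => [pvF c] := by
    funext c; simp
  rw [hR]
  have hL : List.map
      ((fun c => if c = 'Z' then 'S' else c) ∘
        (fun c => if c = 'V' then 'F' else c) ∘
          (fun c => if c = 'J' then 'X' else c) ∘
            (fun c => if c = 'G' then 'K' else c) ∘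
              (fun c => if c = 'D' then 'T' else c) ∘ fun c => if c = 'B' then 'P' else c)
      (PySem.Str.upper text).toList = List.map pvF (PySem.Str.upper text).toList :=
    by
    apply List.map_congr_left
    intro c _
    show _ = pvF c
    simp only [Function.comp_apply]
    exact pv_chain c
  rw [hL]
  have hS : (fun c => [pvF c]) = (fun x => [x]) ∘ pvF := rfl
  rw [hS, ← List.map_map, PySem.Chars.join_nil_singletons]
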